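-- pv_equiv track=rewrite | github.com/FOI-Bioinformatics/baitUtils | baitUtils/coverage_checking.py | split_sequence_at_n
-- ===== SOURCE A (Python) =====
-- from typing import Dict, List, Tuple, Set, Optional, Any
--
-- def split_sequence_at_n(sequence: str) -> List[Tuple[int, str]]:
--     """Split a sequence at 'N' bases. Return list of (start_offset, subsequence)."""
--     parts = []
--     current_start = 0
--     current_seq = []
--
--     for i, base in enumerate(sequence):
--         if base.upper() == 'N':
--             if current_seq:
--                 parts.append((current_start, ''.join(current_seq)))
--                 current_seq = []
--             current_start = i + 1
--         else:
--             current_seq.append(base)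
--
--     if current_seq:
--         parts.append((current_start, ''.join(current_seq)))
--
--     return parts
-- ===== SOURCE B (Python) =====
-- import re
-- from typing import List, Tuple
--
-- def split_sequence_at_n(sequence: str) -> List[Tuple[int, str]]:
--     """Split a sequence at 'N' bases. Return list of (start_offset, subsequence)."""
--     return [(m.start(), m.group()) for m in re.finditer(r'[^Nn]+', sequence)]
-- ===== Notes on version B (the rewrite author's own statement) =====
-- stated objective: idiomatic
-- what changed: Replaces the per-character loop with mutable parts/current_start/current_seq state by a one-line regex scan (re.finditer of maximal [^Nn]+ runs) yielding each run and its offset directly.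
import Mathlib
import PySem

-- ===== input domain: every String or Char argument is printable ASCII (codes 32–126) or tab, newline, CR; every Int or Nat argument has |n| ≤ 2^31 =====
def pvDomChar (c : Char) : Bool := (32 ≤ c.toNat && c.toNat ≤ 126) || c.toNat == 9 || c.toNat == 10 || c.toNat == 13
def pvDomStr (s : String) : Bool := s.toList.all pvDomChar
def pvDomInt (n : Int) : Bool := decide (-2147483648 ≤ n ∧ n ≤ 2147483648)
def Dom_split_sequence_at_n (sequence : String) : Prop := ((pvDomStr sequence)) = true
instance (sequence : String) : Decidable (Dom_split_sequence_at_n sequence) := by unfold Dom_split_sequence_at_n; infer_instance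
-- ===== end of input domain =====

-- B replaces A's per-character loop with mutable accumulator state by a regex scan
-- (re.finditer of maximal [^Nn]+ runs) yielding each run with its offset; objective: idiomatic.


-- ===== PORT A =====
-- the for-loop over enumerate(sequence), state = (parts, current_start, current_seq);
-- 'base.upper()' is PySem.Chars.upperChar (exact on the ASCII domain)
def splitA_loop (cs : List Char) (i : Int) (parts : List (Int × String))
    (current_start : Int) (current_seq : List Char) : List (Int × String) :=
  match cs with
  | [] => if current_seq.isEmpty then parts else parts ++ [(current_start, String.mk current_seq)]
  | base :: rest =>
    if PySem.Chars.upperChar base = 'N' then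
      if current_seq.isEmpty then
        splitA_loop rest (i + 1) parts (i + 1) current_seq
      else
        splitA_loop rest (i + 1) (parts ++ [(current_start, String.mk current_seq)]) (i + 1) []
    else
      splitA_loop rest (i + 1) parts current_start (current_seq ++ [base])

def split_sequence_at_n (sequence : String) : List (Int × String) :=
  splitA_loop sequence.toList 0 [] 0 []

-- ===== PORT B =====
-- re.finditer(r'[^Nn]+', sequence): scan for the maximal runs of non-N characters;
-- each match contributes (m.start(), m.group()).  Exact port of the regex [^Nn]+:
-- a match is a maximal run of characters that are neither 'N' nor 'n'.
def notN (c : Char) : Bool := !(c = 'N' || c = 'n')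

def splitB_scan (cs : List Char) (i : Int) : List (Int × String) :=
  match cs with
  | [] => []
  | c :: rest =>
    if notN c then
      let run : List Char := c :: rest.takeWhile notN
      (i, String.mk run) :: splitB_scan (rest.dropWhile notN) (i + run.length)
    else
      splitB_scan rest (i + 1)
  termination_by cs.length
  decreasing_by
  · simpa using Nat.lt_succ_of_le (rest.length_dropWhile_le notN)
  · simp

def split_sequence_at_n_alt (sequence : String) : List (Int × String) :=
  splitB_scan sequence.toList 0

-- ===== PRECONDITION & SPEC =====
def Spec_split_sequence_at_n (sequence : String) (out : List (Int × String)) : Prop := out = split_sequence_at_n_alt sequence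
instance (sequence : String) (out : List (Int × String)) : Decidable (Spec_split_sequence_at_n sequence out) := by unfold Spec_split_sequence_at_n; infer_instance

-- ===== CLAIM (what is proved, stated in full; the proofs are below) =====
def Claim_equal_split_sequence_at_n : Prop := ∀ (sequence : String), Dom_split_sequence_at_n sequence → Spec_split_sequence_at_n sequence (split_sequence_at_n sequence)

-- ===== LEMMAS AND PROOFS =====

theorem upperChar_eq_N_iff (c : Char) : (PySem.Chars.upperChar c = 'N') ↔ (c = 'N' ∨ c = 'n') := by
  unfold PySem.Chars.upperChar PySem.Chars.islower
  constructor
  · intro he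
    split at he
    · next h =>
      simp only [Bool.and_eq_true, decide_eq_true_eq, Char.le_def] at h
      have hb : 97 ≤ c.toNat ∧ c.toNat ≤ 122 := by
        constructor <;> [exact h.1 ; exact h.2]
      have hval : (Char.ofNat (c.toNat - 32)).toNat = c.toNat - 32 := by
        rw [Char.toNat_ofNat, if_pos]
        unfold Nat.isValidChar
        left; omega
      right
      have h110 : c.toNat = 110 := by
        have := congrArg Char.toNat he
        rw [hval] at this
        simp only [show ('N' : Char).toNat = 78 from rfl] at this
        omega
      have hc := Char.ofNat_toNat c
      rw [h110] at hc
      rw [← hc]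
    · exact Or.inl he
  · rintro h
    rcases h with rfl | rfl <;> decide

theorem notN_false_iff (c : Char) : notN c = false ↔ PySem.Chars.upperChar c = 'N' := by
  rw [upperChar_eq_N_iff]
  simp only [notN, Bool.not_eq_false', Bool.or_eq_true, decide_eq_true_eq]

theorem splitA_eq_scan (cs : List Char) :
    (∀ (i : Int) (parts : List (Int × String)),
      splitA_loop cs i parts i [] = parts ++ splitB_scan cs i) ∧
    (∀ (i start : Int) (parts : List (Int × String)) (cur : List Char), cur ≠ [] →
      splitA_loop cs i parts start cur =
        parts ++ (start, String.mk (cur ++ cs.takeWhile notN)) ::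
          splitB_scan (cs.dropWhile notN) (i + (cs.takeWhile notN).length)) := by
  induction cs with
  | nil =>
    constructor
    · intro i parts
      simp [splitA_loop, splitB_scan]
    · intro i start parts cur hcur
      simp [splitA_loop, splitB_scan, List.isEmpty_iff, hcur]
  | cons c rest ih =>
    obtain ⟨ihP, ihQ⟩ := ih
    by_cases hN : PySem.Chars.upperChar c = 'N'
    · have hn : notN c = false := (notN_false_iff c).mpr hN
      constructor
      · intro i parts
        rw [splitA_loop, if_pos hN]
        simp only [List.isEmpty_nil, if_pos]
        rw [ihP]
        rw [splitB_scan, if_neg (by simp [hn])]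
      · intro i start parts cur hcur
        rw [splitA_loop, if_pos hN, if_neg (by simp [List.isEmpty_iff, hcur])]
        rw [ihP]
        rw [List.takeWhile_cons_of_neg (by simp [hn]), List.dropWhile_cons_of_neg (by simp [hn])]
        rw [splitB_scan, if_neg (by simp [hn])]
        simp
    · have hn : notN c = true := by
        cases h : notN c
        · exact absurd ((notN_false_iff c).mp h) hN
        · rfl
      constructor
      · intro i parts
        rw [splitA_loop, if_neg hN]
        simp only [List.nil_append]
        rw [ihQ (i + 1) i parts [c] (by simp)]
        rw [splitB_scan, if_pos (by simp [hn])]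
        simp only [List.cons_append, List.nil_append, List.length_cons]
        congr 2
        · push_cast; ring_nf

      · intro i start parts cur hcur
        rw [splitA_loop, if_neg hN]
        rw [ihQ (i + 1) start parts (cur ++ [c]) (by simp)]
        rw [List.takeWhile_cons_of_pos (by simp [hn]), List.dropWhile_cons_of_pos (by simp [hn])]
        simp only [List.append_assoc, List.cons_append, List.nil_append, List.length_cons]
        congr 2
        · push_cast; ring_nf


-- ===== VERDICT (by name: the statement is the Claim_ definition above) =====
theorem split_sequence_at_n_spec : Claim_equal_split_sequence_at_n := by
  intro s _
  unfold Spec_split_sequence_at_n split_sequence_at_n split_sequence_at_n_alt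
  simpa using (splitA_eq_scan s.toList).1 0 []
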